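-- pv_equiv track=rewrite | github.com/yonsweng/ps | programmers/dev-matching-2022-backend-2h/b.py | solution
-- ===== SOURCE A (Python) =====
-- def solution(leave, day, holidays):
--     day_to_num = {
--         "MON": 0,
--         "TUE": 1,
--         "WED": 2,
--         "THU": 3,
--         "FRI": 4,
--         "SAT": 5,
--         "SUN": 6,
--     }
--     day = day_to_num[day]
--
--     parities = []
--     for i in range(1, 31):
--         if day == 5 or day == 6 or i in holidays:
--             parities.append(1)
--         else:
--             parities.append(0)
--         day = (day + 1) % 7
--
--     answer = -1
--
--     for i in range(len(parities)):
--         leave_cnt = 0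
--         for tmp_answer, parity in enumerate(parities[i:], 1):
--             if parity == 0:
--                 leave_cnt += 1
--                 if leave_cnt > leave:
--                     break
--
--             answer = max(tmp_answer, answer)
--
--     return answer
-- ===== SOURCE B (Python) =====
-- DAYS = ["MON", "TUE", "WED", "THU", "FRI", "SAT", "SUN"]
--
--
-- def solution(leave, day, holidays):
--     d = DAYS.index(day)
--     parities = [1 if (d + i) % 7 >= 5 or (i + 1) in holidays else 0
--                 for i in range(30)]
--
--     k = max(leave, 0)
--     answer = -1
--     left = 0
--     cnt = 0
--     for right in range(30):
--         if parities[right] == 0: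
--             cnt += 1
--         while cnt > k:
--             if parities[left] == 0:
--                 cnt -= 1
--             left += 1
--         if left <= right:
--             answer = max(answer, right - left + 1)
--     return answer
-- ===== Notes on version B (the rewrite author's own statement) =====
-- stated objective: faster
-- what changed: B replaces A's quadratic scan of every window start (with an inner enumerate/break loop) by a single two-pointer sliding-window pass over the 30-day parity list, and builds the parity list by a direct (d+i)%7 formula with DAYS.index instead of a dict and a mutated day counter.
import Mathlib
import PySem

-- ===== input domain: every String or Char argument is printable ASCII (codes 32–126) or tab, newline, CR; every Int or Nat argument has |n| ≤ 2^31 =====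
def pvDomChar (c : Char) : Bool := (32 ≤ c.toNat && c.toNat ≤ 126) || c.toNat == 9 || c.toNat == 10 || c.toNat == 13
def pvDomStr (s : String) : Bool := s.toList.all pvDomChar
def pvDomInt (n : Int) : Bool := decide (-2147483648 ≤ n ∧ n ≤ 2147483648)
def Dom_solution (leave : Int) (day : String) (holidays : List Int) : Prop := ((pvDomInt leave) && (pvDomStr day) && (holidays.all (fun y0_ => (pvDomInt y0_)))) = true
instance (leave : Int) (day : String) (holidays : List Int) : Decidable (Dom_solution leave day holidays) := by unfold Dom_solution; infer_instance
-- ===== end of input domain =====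

-- B replaces A's quadratic scan over all window starts by a single two-pointer
-- sliding-window pass over the 30-day parity list (objective: faster).

-- ===== PORT A =====
def dayToNumA : PySem.Dict String Int :=
  PySem.Dict.ofList
    [("MON", 0), ("TUE", 1), ("WED", 2), ("THU", 3), ("FRI", 4), ("SAT", 5), ("SUN", 6)]

-- the parity-building loop of A; state = (day, parities).
-- `(day + 1) % 7`: day stays in [0,7), so Lean's `%` agrees with Python's here.
def stepA (holidays : List Int) (s : Int × List Int) (i : Int) : Int × List Int :=
  ((s.1 + 1) % 7,
    if s.1 = 5 ∨ s.1 = 6 ∨ i ∈ holidays then s.2 ++ [(1 : Int)] else s.2 ++ [(0 : Int)])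

def buildA (d0 : Int) (holidays : List Int) : Int × List Int :=
  (PySem.List.pyRange 1 31 1).foldl (stepA holidays) (d0, [])

-- the inner `for tmp_answer, parity in enumerate(parities[i:], 1)` loop with its break
def innerA (leave : Int) : List Int → Int → Int → Int → Int
  | [], _, _, ans => ans
  | parity :: rest, tmp, cnt, ans =>
    if parity = 0 then
      if cnt + 1 > leave then ans
      else innerA leave rest (tmp + 1) (cnt + 1) (max tmp ans)
    else innerA leave rest (tmp + 1) cnt (max tmp ans)

def solution (leave : Int) (day : String) (holidays : List Int) : Int :=
  -- day_to_num[day]; KeyError outside Pre_solution (default 0 is never read under Pre_)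
  let d := (dayToNumA.get? day).getD 0
  let parities := (buildA d holidays).2
  (PySem.List.pyRange 0 (parities.length : Int) 1).foldl
    (fun answer i =>
      innerA leave (PySem.List.slice parities (some i) none) 1 0 answer)
    (-1)

-- ===== PORT B =====
def dayNamesB : List String := ["MON", "TUE", "WED", "THU", "FRI", "SAT", "SUN"]

-- `parities = [1 if (d + i) % 7 >= 5 or (i + 1) in holidays else 0 for i in range(30)]`
-- (d ≥ 0 and i ≥ 0, so Lean's `%` agrees with Python's)
def buildB (d : Int) (holidays : List Int) : List Int :=
  (PySem.List.pyRange 0 30 1).map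
    (fun i => if 5 ≤ (d + i) % 7 ∨ (i + 1) ∈ holidays then (1 : Int) else 0)

-- the `while cnt > k: …` loop; fuel 31 only makes it total, Python's loop does ≤ 30 steps
def shrinkB (parities : List Int) (k : Int) : Nat → Int → Int → Int × Int
  | 0, left, cnt => (left, cnt)
  | fuel + 1, left, cnt =>
    if cnt > k then
      shrinkB parities k fuel (left + 1)
        (if PySem.List.pyGetD parities left 0 = 0 then cnt - 1 else cnt)
    else (left, cnt)

-- one iteration of `for right in range(30)`; state = (answer, left, cnt)
def stepB (parities : List Int) (k : Int) (s : Int × Int × Int) (right : Int) : Int × Int × Int :=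
  let cnt := if PySem.List.pyGetD parities right 0 = 0 then s.2.2 + 1 else s.2.2
  let lc := shrinkB parities k 31 s.2.1 cnt
  (if lc.1 ≤ right then max s.1 (right - lc.1 + 1) else s.1, lc.1, lc.2)

def solution_alt (leave : Int) (day : String) (holidays : List Int) : Int :=
  -- DAYS.index(day); ValueError outside Pre_solution (default 0 is never read under Pre_)
  let d : Int := ((PySem.List.index? dayNamesB day).getD 0 : Nat)
  let parities := buildB d holidays
  let k := max leave 0
  ((PySem.List.pyRange 0 30 1).foldl (stepB parities k) (-1, 0, 0)).1

-- ===== PRECONDITION & SPEC =====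
-- Pre_ excludes exactly the inputs where A raises KeyError: `day` not one of the 7 day names.
def Pre_solution (leave : Int) (day : String) (holidays : List Int) : Prop :=
  day = "MON" ∨ day = "TUE" ∨ day = "WED" ∨ day = "THU" ∨ day = "FRI" ∨ day = "SAT" ∨ day = "SUN"
instance (leave : Int) (day : String) (holidays : List Int) : Decidable (Pre_solution leave day holidays) := by
  unfold Pre_solution; infer_instance

def pvWitness_solution : Int × String × List Int := (2, "WED", [4, 11, 28])

def Spec_solution (leave : Int) (day : String) (holidays : List Int) (out : Int) : Prop := out = solution_alt leave day holidays
instance (leave : Int) (day : String) (holidays : List Int) (out : Int) : Decidable (Spec_solution leave day holidays out) := by unfold Spec_solution; infer_instance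

-- ===== CLAIM (what is proved, stated in full; the proofs are below) =====
def Claim_equal_solution : Prop := ∀ (leave : Int) (day : String) (holidays : List Int), Dom_solution leave day holidays → Pre_solution leave day holidays → Spec_solution leave day holidays (solution leave day holidays)

-- ===== LEMMAS AND PROOFS =====

-- zeros of a window
def pvZeros (s : List Int) : Nat := s.countP (fun x => decide (x = 0))

-- longest prefix of xs containing at most b zeros (the length A's inner loop reaches)
def pvL : List Int → Int → Nat
  | [], _ => 0
  | x :: r, b => if x = 0 then (if b ≤ 0 then 0 else pvL r (b - 1) + 1) else pvL r b + 1

-- the window p[l:r]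
def pvW (p : List Int) (l r : Nat) : List Int := (p.take r).drop l

theorem pvW_exists (p : List Int) (k : Int) (hk : 0 ≤ k) (r : Nat) :
    ∃ l, (pvZeros (pvW p l r) : Int) ≤ k := by
  refine ⟨r, ?_⟩
  have h : pvW p r r = [] := by
    simp [pvW]
  simp [h, pvZeros, hk]

-- minimal left end of a ≤k-zeros window with right end r (exclusive)
def pvMinl (p : List Int) (k : Int) (hk : 0 ≤ k) (r : Nat) : Nat :=
  Nat.find (pvW_exists p k hk r)

-- maximal window length with right end at index t-1, as a function of t, summed up to n
def pvMB (p : List Int) (k : Int) (hk : 0 ≤ k) (n : Nat) : Nat :=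
  (Finset.range n).sup (fun t => (t + 1) - pvMinl p k hk (t + 1))

-- maximal ≤k-zeros prefix length over all suffixes (what A's double loop maximises)
def pvMA (p : List Int) (k : Int) (n : Nat) : Nat :=
  (Finset.range n).sup (fun i => pvL (p.drop i) k)

theorem pvZeros_append (a b : List Int) : pvZeros (a ++ b) = pvZeros a + pvZeros b := by
  simp [pvZeros, List.countP_append]

theorem pvW_nil (p : List Int) {l r : Nat} (h : r ≤ l) : pvW p l r = [] := by
  apply List.drop_eq_nil_of_le
  exact le_trans (List.length_take_le _ _) h

theorem pvW_succ (p : List Int) {l r : Nat} (hl : l ≤ r) (hr : r < p.length) :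
    pvW p l (r + 1) = pvW p l r ++ [p[r]] := by
  unfold pvW
  rw [List.take_succ, List.getElem?_eq_getElem hr]
  simp only [Option.toList_some]
  rw [List.drop_append_of_le_length]
  rw [List.length_take]
  omega

theorem pvW_cons (p : List Int) {l r : Nat} (hl : l < r) (hr : r ≤ p.length) :
    pvW p l r = p[l]'(lt_of_lt_of_le hl hr) :: pvW p (l + 1) r := by
  unfold pvW
  have hlt : l < (p.take r).length := by
    rw [List.length_take]; omega
  rw [List.drop_eq_getElem_cons hlt]
  congr 1
  exact List.getElem_take

theorem pvW_eq_take_drop (p : List Int) (l m : Nat) :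
    pvW p l (l + m) = (p.drop l).take m := by
  unfold pvW
  rw [List.drop_take]
  congr 1
  omega

theorem pvZeros_W_antitone (p : List Int) (r : Nat) {l l' : Nat} (h : l ≤ l') :
    pvZeros (pvW p l' r) ≤ pvZeros (pvW p l r) := by
  have hW : pvW p l' r = (pvW p l r).drop (l' - l) := by
    unfold pvW
    rw [List.drop_drop]
    congr 1
    omega
  rw [hW]
  exact (List.drop_sublist _ _).countP_le

theorem pvMinl_le (p : List Int) (k : Int) (hk : 0 ≤ k) (r : Nat) :
    pvMinl p k hk r ≤ r := by
  apply Nat.find_min'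
  rw [pvW_nil p (le_refl r)]
  simpa [pvZeros] using hk

theorem pvMinl_spec (p : List Int) (k : Int) (hk : 0 ≤ k) (r : Nat) :
    (pvZeros (pvW p (pvMinl p k hk r) r) : Int) ≤ k := Nat.find_spec (pvW_exists p k hk r)

theorem pvMinl_min (p : List Int) (k : Int) (hk : 0 ≤ k) (r : Nat) {l : Nat}
    (h : l < pvMinl p k hk r) : ¬ ((pvZeros (pvW p l r) : Int) ≤ k) :=
  Nat.find_min (pvW_exists p k hk r) h

theorem pvMinl_le_of (p : List Int) (k : Int) (hk : 0 ≤ k) (r : Nat) {l : Nat}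
    (h : (pvZeros (pvW p l r) : Int) ≤ k) : pvMinl p k hk r ≤ l :=
  Nat.find_min' (pvW_exists p k hk r) h

theorem pvMinl_zero (p : List Int) (k : Int) (hk : 0 ≤ k) : pvMinl p k hk 0 = 0 := by
  simpa using pvMinl_le p k hk 0

theorem pvMinl_mono (p : List Int) (k : Int) (hk : 0 ≤ k) {r : Nat} (hr : r < p.length) :
    pvMinl p k hk r ≤ pvMinl p k hk (r + 1) := by
  by_contra hcon
  push_neg at hcon
  have hle : pvMinl p k hk (r + 1) ≤ r := lt_of_lt_of_le hcon (pvMinl_le p k hk r) |>.le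
  have h1 : (pvZeros (pvW p (pvMinl p k hk (r + 1)) (r + 1)) : Int) ≤ k := pvMinl_spec p k hk (r + 1)
  have h2 := pvMinl_min p k hk r hcon
  apply h2
  have hW := pvW_succ p hle hr
  have := pvZeros_append (pvW p (pvMinl p k hk (r + 1)) r) [p[r]]
  rw [hW, this] at h1
  have : (pvZeros (pvW p (pvMinl p k hk (r + 1)) r) : Int) ≤ k := by
    push_cast at h1 ⊢
    have := pvZeros [p[r]]
    omega
  exact this

theorem pvL_le_length (xs : List Int) (b : Int) : pvL xs b ≤ xs.length := by
  induction xs generalizing b with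
  | nil => simp [pvL]
  | cons x r ih =>
    simp only [pvL, List.length_cons]
    split_ifs
    · omega
    · have := ih (b - 1); omega
    · have := ih b; omega

theorem pvL_zeros (xs : List Int) {b : Int} (hb : 0 ≤ b) :
    (pvZeros (xs.take (pvL xs b)) : Int) ≤ b := by
  induction xs generalizing b with
  | nil => simpa [pvL, pvZeros] using hb
  | cons x r ih =>
    simp only [pvL]
    split_ifs with h1 h2
    · simpa [pvZeros] using hb
    · have hb1 : (0 : Int) ≤ b - 1 := by omega
      have hih := ih hb1
      rw [List.take_succ_cons]
      simp only [pvZeros, List.countP_cons, h1] at hih ⊢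
      simp only [decide_true, if_true]
      push_cast at hih ⊢
      omega
    · have hih := ih hb
      rw [List.take_succ_cons]
      simp only [pvZeros, List.countP_cons] at hih ⊢
      simp only [h1, decide_false, if_false]
      push_cast at hih ⊢
      omega

theorem pvL_ge (xs : List Int) {b : Int} {t : Nat} (ht : t ≤ xs.length)
    (h : (pvZeros (xs.take t) : Int) ≤ b) : t ≤ pvL xs b := by
  induction xs generalizing t b with
  | nil =>
    simp only [List.length_nil, Nat.le_zero] at ht
    simp [ht]
  | cons x r ih =>
    match t with
    | 0 => exact Nat.zero_le _
    | t + 1 =>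
      rw [List.take_succ_cons] at h
      simp only [pvZeros, List.countP_cons] at h
      simp only [List.length_cons, Nat.add_le_add_iff_right] at ht
      by_cases h1 : x = 0
      · simp only [h1, decide_true, if_true] at h
        push_cast at h
        have hb : ¬ (b ≤ 0) := by
          have : (0 : Int) ≤ (r.take t).countP (fun x => decide (x = 0)) := by positivity
          omega
        simp only [pvL, h1, if_true, if_neg hb, Nat.add_le_add_iff_right]
        exact ih ht (by unfold pvZeros; push_cast; omega)
      · simp only [h1, decide_false, if_false] at h
        push_cast at h
        simp only [pvL, h1, if_false, Nat.add_le_add_iff_right]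
        exact ih ht (by unfold pvZeros; push_cast; omega)

theorem pvL_clamp (xs : List Int) {b c : Int} (hb : b ≤ 0) (hc : c ≤ 0) :
    pvL xs b = pvL xs c := by
  induction xs generalizing b c with
  | nil => rfl
  | cons x r ih =>
    simp only [pvL]
    by_cases h1 : x = 0
    · simp [h1, hb, hc]
    · simp only [h1, if_false]
      rw [ih hb hc]

theorem pvL_max_zero (xs : List Int) (b : Int) : pvL xs b = pvL xs (max b 0) := by
  by_cases h : b ≤ 0
  · rw [pvL_clamp xs h (le_refl 0), max_eq_right h]
  · rw [max_eq_left (by omega : (0:Int) ≤ b)]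

theorem pv_max3 (tmp ans v : Int) (h : tmp ≤ v) : max (max tmp ans) v = max ans v := by
  rw [max_comm tmp ans, max_assoc, max_eq_right h]

theorem innerA_char (leave : Int) (xs : List Int) : ∀ (tmp cnt ans : Int),
    innerA leave xs tmp cnt ans =
      if pvL xs (leave - cnt) = 0 then ans else max ans (tmp + (pvL xs (leave - cnt) : Int) - 1) := by
  induction xs with
  | nil => intro tmp cnt ans; simp [innerA, pvL]
  | cons x r ih =>
    intro tmp cnt ans
    by_cases h1 : x = 0
    · by_cases h2 : cnt + 1 > leave
      · have hb : leave - cnt ≤ 0 := by omega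
        simp [innerA, pvL, h1, h2, hb]
      · have hb : ¬ (leave - cnt ≤ 0) := by omega
        have hstep : innerA leave (x :: r) tmp cnt ans = innerA leave r (tmp + 1) (cnt + 1) (max tmp ans) := by
          simp [innerA, h1, h2]
        rw [hstep, ih]
        have he : leave - (cnt + 1) = leave - cnt - 1 := by ring
        rw [he]
        simp only [pvL, h1, if_true, if_neg hb]
        by_cases h3 : pvL r (leave - cnt - 1) = 0
        · rw [if_pos h3, if_neg (by omega : ¬ (pvL r (leave - cnt - 1) + 1 = 0))]
          push_cast [h3]
          rw [show tmp + 1 - 1 = tmp from by ring]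
          exact max_comm _ _
        · rw [if_neg h3, if_neg (by omega : ¬ (pvL r (leave - cnt - 1) + 1 = 0))]
          push_cast
          rw [show tmp + 1 + (pvL r (leave - cnt - 1) : Int) - 1
                = tmp + (pvL r (leave - cnt - 1) : Int) from by ring,
              show tmp + ((pvL r (leave - cnt - 1) : Int) + 1) - 1
                = tmp + (pvL r (leave - cnt - 1) : Int) from by ring]
          exact pv_max3 _ _ _ (le_add_of_nonneg_right (by positivity))
    · have hstep : innerA leave (x :: r) tmp cnt ans = innerA leave r (tmp + 1) cnt (max tmp ans) := by
        simp [innerA, h1]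
      rw [hstep, ih]
      simp only [pvL, h1, if_false]
      by_cases h3 : pvL r (leave - cnt) = 0
      · rw [if_pos h3, if_neg (by omega : ¬ (pvL r (leave - cnt) + 1 = 0))]
        push_cast [h3]
        rw [show tmp + 1 - 1 = tmp from by ring]
        exact max_comm _ _
      · rw [if_neg h3, if_neg (by omega : ¬ (pvL r (leave - cnt) + 1 = 0))]
        push_cast
        rw [show tmp + 1 + (pvL r (leave - cnt) : Int) - 1
              = tmp + (pvL r (leave - cnt) : Int) from by ring,
            show tmp + ((pvL r (leave - cnt) : Int) + 1) - 1
              = tmp + (pvL r (leave - cnt) : Int) from by ring]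
        exact pv_max3 _ _ _ (le_add_of_nonneg_right (by positivity))

theorem fold_if_max (g : Nat → Nat) : ∀ (n : Nat) (a : Int),
    (List.range n).foldl (fun ans i => if g i = 0 then ans else max ans (g i : Int)) a =
      (if ((Finset.range n).sup g : Nat) = 0 then a else max a (((Finset.range n).sup g : Nat) : Int)) := by
  intro n
  induction n with
  | zero => intro a; simp
  | succ n ih =>
    intro a
    rw [List.range_succ, List.foldl_append, ih]
    simp only [List.foldl_cons, List.foldl_nil]
    rw [Finset.range_add_one, Finset.sup_insert]
    have hmax : g n ⊔ (Finset.range n).sup g = max (g n) ((Finset.range n).sup g) := rfl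
    rw [hmax]
    by_cases hg : g n = 0
    · simp [hg]
    · by_cases hS : (Finset.range n).sup g = 0
      · simp [hg, hS]
      · rw [if_neg hS, if_neg hg, if_neg (by omega : ¬ (max (g n) ((Finset.range n).sup g) = 0))]
        push_cast
        rw [max_assoc, max_comm ((((Finset.range n).sup g) : Nat) : Int) (((g n : Nat)) : Int)]

theorem shrink_char (p : List Int) (k : Int) (hk : 0 ≤ k) (r : Nat) (hr : r + 1 ≤ p.length) :
    ∀ (fuel l : Nat), l ≤ pvMinl p k hk (r + 1) → pvMinl p k hk (r + 1) - l < fuel →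
      shrinkB p k fuel (l : Int) (pvZeros (pvW p l (r + 1)) : Int) =
        ((pvMinl p k hk (r + 1) : Int), (pvZeros (pvW p (pvMinl p k hk (r + 1)) (r + 1)) : Int)) := by
  intro fuel
  induction fuel with
  | zero => intro l _ h2; exact absurd h2 (Nat.not_lt_zero _)
  | succ fuel ih =>
    intro l h1 h2
    simp only [shrinkB]
    by_cases hc : (pvZeros (pvW p l (r + 1)) : Int) > k
    · rw [if_pos hc]
      have hlm : l < pvMinl p k hk (r + 1) := by
        rcases Nat.lt_or_ge l (pvMinl p k hk (r + 1)) with h | h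
        · exact h
        · exact absurd (le_trans (Int.ofNat_le.mpr (pvZeros_W_antitone p (r + 1) h))
            (pvMinl_spec p k hk (r + 1))) (not_le.mpr hc)
      have hlr : l < r + 1 := lt_of_lt_of_le hlm (pvMinl_le p k hk (r + 1))
      have hll : l < p.length := lt_of_lt_of_le hlr hr
      have hget : PySem.List.pyGetD p (l : Int) 0 = p[l] := by
        rw [PySem.List.pyGetD_natCast]
        exact List.getD_eq_getElem p 0 hll
      have hW := pvW_cons p hlr hr
      have hz : (if PySem.List.pyGetD p (l : Int) 0 = 0 then (pvZeros (pvW p l (r + 1)) : Int) - 1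
          else (pvZeros (pvW p l (r + 1)) : Int)) = (pvZeros (pvW p (l + 1) (r + 1)) : Int) := by
        rw [hget, hW]
        simp only [pvZeros, List.countP_cons]
        by_cases hx : p[l] = 0
        · simp only [hx, decide_true, if_pos rfl]
          push_cast
          ring
        · rw [if_neg hx]
          simp [hx]
      rw [hz]
      rw [show (l : Int) + 1 = ((l + 1 : Nat) : Int) from by push_cast; ring]
      exact ih (l + 1) hlm (by omega)
    · rw [if_neg hc]
      have hml : pvMinl p k hk (r + 1) ≤ l := pvMinl_le_of p k hk (r + 1) (not_lt.mp hc)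
      have heq : l = pvMinl p k hk (r + 1) := le_antisymm h1 hml
      rw [heq]

theorem foldB_inv (p : List Int) (k : Int) (hk : 0 ≤ k) (hlen : p.length = 30) :
    ∀ (r : Nat), r ≤ 30 →
      ((List.range r).map (Nat.cast : Nat → Int)).foldl (stepB p k) (-1, 0, 0) =
        ((if pvMB p k hk r = 0 then -1 else (pvMB p k hk r : Int)),
          (pvMinl p k hk r : Int), (pvZeros (pvW p (pvMinl p k hk r) r) : Int)) := by
  intro r
  induction r with
  | zero =>
    intro _
    simp [pvMB, pvMinl_zero, pvW_nil p (le_refl 0), pvZeros]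
  | succ r ih =>
    intro h30
    have hr30 : r ≤ 30 := by omega
    have hrlen : r < p.length := by rw [hlen]; omega
    have hr1len : r + 1 ≤ p.length := by omega
    rw [List.range_succ, List.map_append, List.foldl_append, ih hr30]
    simp only [List.map_cons, List.map_nil, List.foldl_cons, List.foldl_nil]
    simp only [stepB]
    have hget : PySem.List.pyGetD p (r : Int) 0 = p[r] := by
      rw [PySem.List.pyGetD_natCast]
      exact List.getD_eq_getElem p 0 hrlen
    have hWs := pvW_succ p (pvMinl_le p k hk r) hrlen
    have hcnt : (if PySem.List.pyGetD p (r : Int) 0 = 0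
        then (pvZeros (pvW p (pvMinl p k hk r) r) : Int) + 1
        else (pvZeros (pvW p (pvMinl p k hk r) r) : Int))
        = (pvZeros (pvW p (pvMinl p k hk r) (r + 1)) : Int) := by
      rw [hget, hWs, pvZeros_append]
      by_cases hx : p[r] = 0
      · rw [if_pos hx]
        simp [pvZeros, List.countP_cons]
        exact hx
      · rw [if_neg hx]
        simp [pvZeros, List.countP_cons]
        exact hx
    simp only [hcnt]
    have hm1le : pvMinl p k hk (r + 1) ≤ r + 1 := pvMinl_le p k hk (r + 1)
    have hsh := shrink_char p k hk r hr1len 31 (pvMinl p k hk r) (pvMinl_mono p k hk hrlen)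
      (by omega)
    rw [hsh]
    have hMB : pvMB p k hk (r + 1) = max ((r + 1) - pvMinl p k hk (r + 1)) (pvMB p k hk r) := by
      unfold pvMB
      rw [Finset.range_add_one, Finset.sup_insert]
    by_cases hcase : pvMinl p k hk (r + 1) ≤ r
    · rw [if_pos (by exact_mod_cast Nat.cast_le.mpr hcase : ((pvMinl p k hk (r + 1) : Nat) : Int) ≤ (r : Int))]
      congr 1
      rw [hMB]
      have hlge : 1 ≤ (r + 1) - pvMinl p k hk (r + 1) := by omega
      have hcast : (r : Int) - (pvMinl p k hk (r + 1) : Int) + 1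
          = (((r + 1) - pvMinl p k hk (r + 1) : Nat) : Int) := by
        push_cast [Nat.cast_sub hm1le]
        ring
      by_cases hMB0 : pvMB p k hk r = 0
      · rw [if_pos hMB0, if_neg (by omega : ¬ (max ((r + 1) - pvMinl p k hk (r + 1)) (pvMB p k hk r) = 0))]
        rw [hcast, hMB0, Nat.max_zero]
        exact max_eq_right (by omega)
      · rw [if_neg hMB0, if_neg (by omega : ¬ (max ((r + 1) - pvMinl p k hk (r + 1)) (pvMB p k hk r) = 0))]
        rw [hcast]
        rw [Nat.cast_max]
        exact max_comm _ _
    · have hm1 : pvMinl p k hk (r + 1) = r + 1 := by omega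
      rw [if_neg (by rw [hm1]; push_cast; omega : ¬ (((pvMinl p k hk (r + 1) : Nat) : Int) ≤ (r : Int)))]
      congr 1
      rw [hMB, hm1]
      simp

theorem bridge (p : List Int) (k : Int) (hk : 0 ≤ k) :
    pvMA p k p.length = pvMB p k hk p.length := by
  apply le_antisymm
  · unfold pvMA pvMB
    apply Finset.sup_le
    intro i hi
    rw [Finset.mem_range] at hi
    rcases Nat.eq_zero_or_pos (pvL (p.drop i) k) with h0 | hpos
    · rw [h0]; exact Nat.zero_le _
    · have hlenle : pvL (p.drop i) k ≤ p.length - i := by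
        have := pvL_le_length (p.drop i) k
        simpa [List.length_drop] using this
      have ht : i + pvL (p.drop i) k ≤ p.length := by omega
      have hz : (pvZeros (pvW p i (i + pvL (p.drop i) k)) : Int) ≤ k := by
        rw [pvW_eq_take_drop]
        exact pvL_zeros _ hk
      have hml : pvMinl p k hk (i + pvL (p.drop i) k) ≤ i := pvMinl_le_of p k hk _ hz
      have htn : i + pvL (p.drop i) k - 1 < p.length := by omega
      have hstep : i + pvL (p.drop i) k - 1 + 1 = i + pvL (p.drop i) k := by omega
      calc pvL (p.drop i) k
          ≤ (i + pvL (p.drop i) k - 1 + 1) - pvMinl p k hk (i + pvL (p.drop i) k - 1 + 1) := by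
            rw [hstep]; omega
        _ ≤ _ := Finset.le_sup (f := fun t => (t + 1) - pvMinl p k hk (t + 1))
            (Finset.mem_range.mpr htn)
  · unfold pvMA pvMB
    apply Finset.sup_le
    intro t ht
    rw [Finset.mem_range] at ht
    have hl1 : pvMinl p k hk (t + 1) ≤ t + 1 := pvMinl_le p k hk (t + 1)
    rcases Nat.eq_or_lt_of_le hl1 with he | hlt
    · rw [he]
      simp
    · have hz := pvMinl_spec p k hk (t + 1)
      have hW := pvW_eq_take_drop p (pvMinl p k hk (t + 1)) ((t + 1) - pvMinl p k hk (t + 1))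
      rw [show pvMinl p k hk (t + 1) + ((t + 1) - pvMinl p k hk (t + 1)) = t + 1 from by omega] at hW
      have hge : (t + 1) - pvMinl p k hk (t + 1) ≤ pvL (p.drop (pvMinl p k hk (t + 1))) k := by
        apply pvL_ge
        · rw [List.length_drop]; omega
        · rw [← hW]; exact hz
      calc (t + 1) - pvMinl p k hk (t + 1) ≤ pvL (p.drop (pvMinl p k hk (t + 1))) k := hge
        _ ≤ _ := Finset.le_sup (f := fun j => pvL (p.drop j) k)
            (Finset.mem_range.mpr (by omega : pvMinl p k hk (t + 1) < p.length))

theorem mainEq (p : List Int) (leave : Int) (hlen : p.length = 30) :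
    (PySem.List.pyRange 0 (p.length : Int) 1).foldl
      (fun answer i => innerA leave (PySem.List.slice p (some i) none) 1 0 answer) (-1) =
      ((PySem.List.pyRange 0 30 1).foldl (stepB p (max leave 0)) (-1, 0, 0)).1 := by
  have hk : (0 : Int) ≤ max leave 0 := le_max_right _ _
  have hR : PySem.List.pyRange 0 30 1 = (List.range 30).map (Nat.cast : Nat → Int) := by
    rw [PySem.List.pyRange_one]
    norm_num
    rfl
  have hL : PySem.List.pyRange 0 (p.length : Int) 1 = (List.range 30).map (Nat.cast : Nat → Int) := by
    rw [hlen, PySem.List.pyRange_one]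
    norm_num
    rfl
  rw [hL, hR, foldB_inv p (max leave 0) hk hlen 30 (le_refl 30), List.foldl_map]
  have hfe : (fun (answer : Int) (i : Nat) =>
        innerA leave (PySem.List.slice p (some ((Nat.cast : Nat → Int) i)) none) 1 0 answer)
      = (fun (ans : Int) (i : Nat) =>
        if pvL (p.drop i) (max leave 0) = 0 then ans
        else max ans ((pvL (p.drop i) (max leave 0) : Nat) : Int)) := by
    funext ans i
    rw [PySem.List.slice_from_natCast, innerA_char]
    rw [show leave - 0 = leave from by ring, pvL_max_zero]
    by_cases h : pvL (p.drop i) (max leave 0) = 0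
    · simp [h]
    · rw [if_neg h, if_neg h]
      congr 1
      ring
  rw [hfe, fold_if_max (fun i => pvL (p.drop i) (max leave 0)) 30 (-1)]
  have hMA : (Finset.range 30).sup (fun i => pvL (p.drop i) (max leave 0))
      = pvMA p (max leave 0) p.length := by
    rw [hlen]; rfl
  rw [hMA, bridge p (max leave 0) hk, hlen]
  split_ifs with h
  · rfl
  · exact max_eq_right (by omega)

theorem foldA_char (holidays : List Int) : ∀ (n : Nat) (d : Int), 0 ≤ d → d < 7 →
    ((List.range n).map (fun j : Nat => 1 + (j : Int))).foldl (stepA holidays) (d, []) =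
      ((d + n) % 7,
        (List.range n).map (fun j : Nat =>
          if (d + (j : Int)) % 7 = 5 ∨ (d + (j : Int)) % 7 = 6 ∨ (1 + (j : Int)) ∈ holidays
          then (1 : Int) else 0)) := by
  intro n
  induction n with
  | zero =>
    intro d hd0 hd7
    simp [Int.emod_eq_of_lt hd0 hd7]
  | succ n ih =>
    intro d hd0 hd7
    rw [List.range_succ, List.map_append, List.map_append, List.foldl_append, ih d hd0 hd7]
    simp only [List.map_cons, List.map_nil, List.foldl_cons, List.foldl_nil]
    unfold stepA
    have hday : ((d + (n : Int)) % 7 + 1) % 7 = (d + ((n + 1 : Nat) : Int)) % 7 := by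
      push_cast
      omega
    have hcond : ((d + (n : Int)) % 7 = 5 ∨ (d + (n : Int)) % 7 = 6 ∨ (1 + (n : Int)) ∈ holidays)
        = ((d + (n : Int)) % 7 = 5 ∨ (d + (n : Int)) % 7 = 6 ∨ (1 + (n : Int)) ∈ holidays) := rfl
    refine Prod.ext ?_ ?_
    · simpa using hday
    · split_ifs with h <;> simp

theorem build_eq (d : Int) (holidays : List Int) (hd0 : 0 ≤ d) (hd7 : d < 7) :
    (buildA d holidays).2 = buildB d holidays := by
  have h31 : PySem.List.pyRange 1 31 1 = (List.range 30).map (fun j : Nat => 1 + (j : Int)) := by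
    rw [PySem.List.pyRange_one]
    norm_num
    rfl
  have h30 : PySem.List.pyRange 0 30 1 = (List.range 30).map (Nat.cast : Nat → Int) := by
    rw [PySem.List.pyRange_one]
    norm_num
    rfl
  unfold buildA buildB
  rw [h31, h30, foldA_char holidays 30 d hd0 hd7]
  dsimp only
  rw [List.map_map]
  apply List.map_congr_left
  intro j hj
  simp only [Function.comp]
  have h1 : (0 : Int) ≤ (d + (j : Int)) % 7 := Int.emod_nonneg _ (by norm_num)
  have h2 : (d + (j : Int)) % 7 < 7 := Int.emod_lt_of_pos _ (by norm_num)
  rw [show (1 + (j : Int)) = ((j : Int) + 1) from by ring]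
  split_ifs with hA hB hB
  · rfl
  · rcases hA with h | h | h
    · exact absurd (Or.inl (by omega)) hB
    · exact absurd (Or.inl (by omega)) hB
    · exact absurd (Or.inr h) hB
  · rcases hB with h | h
    · rcases (by omega : (d + (j : Int)) % 7 = 5 ∨ (d + (j : Int)) % 7 = 6) with h5 | h6
      · exact absurd (Or.inl h5) hA
      · exact absurd (Or.inr (Or.inl h6)) hA
    · exact absurd (Or.inr (Or.inr h)) hA
  · rfl

theorem buildB_length (d : Int) (holidays : List Int) : (buildB d holidays).length = 30 := by
  simp [buildB, PySem.List.length_pyRange_one]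

-- ===== VERDICT (by name: the statement is the Claim_ definition above) =====
theorem solution_spec : Claim_equal_solution := by
  unfold Claim_equal_solution Spec_solution
  intro leave day holidays _ hpre
  have hd : ∃ d0 : Int, (dayToNumA.get? day).getD 0 = d0 ∧
      (((PySem.List.index? dayNamesB day).getD 0 : Nat) : Int) = d0 ∧ 0 ≤ d0 ∧ d0 < 7 := by
    rcases hpre with h | h | h | h | h | h | h <;> subst h
    · exact ⟨0, by decide, by decide, by decide, by decide⟩
    · exact ⟨1, by decide, by decide, by decide, by decide⟩
    · exact ⟨2, by decide, by decide, by decide, by decide⟩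
    · exact ⟨3, by decide, by decide, by decide, by decide⟩
    · exact ⟨4, by decide, by decide, by decide, by decide⟩
    · exact ⟨5, by decide, by decide, by decide, by decide⟩
    · exact ⟨6, by decide, by decide, by decide, by decide⟩
  obtain ⟨d0, hA, hB, h0, h7⟩ := hd
  simp only [solution, solution_alt]
  rw [hA, hB, build_eq d0 holidays h0 h7]
  exact mainEq (buildB d0 holidays) leave (buildB_length d0 holidays)
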